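-- pv_equiv track=rewrite | github.com/TechlauncherFireApp/web | backend/gurobi/Scheduler.py | genClashes
-- ===== SOURCE A (Python) =====
-- def rangeOverlaps(range1, range2):
--     start1 = range1[0]
--     start2 = range2[0]
--     end1 = range1[1]
--     end2 = range2[1]
--     if (end1 < start2) or (end2 < start1):
--         return False
--     else:
--         return True
--
-- def genClashes(VehicleRequest):
--     clashing = []
--     for request1 in VehicleRequest:
--         currentRequestClashes = []
--         for request2 in VehicleRequest:
--             currentRequestClashes.append(rangeOverlaps(request1["timeframe"], request2["timeframe"]))
--         clashing.append(currentRequestClashes)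
--     for i in range(len(VehicleRequest)):
--         clashing[i][i] = False
--     return clashing
-- ===== SOURCE B (Python) =====
-- def overlaps(t1, t2):
--     return t2[0] <= t1[1] and t1[0] <= t2[1]
--
-- def genClashes(VehicleRequest):
--     m = []
--     seen = []
--     for r in VehicleRequest:
--         tf = r["timeframe"]
--         for t, row in zip(seen, m):
--             row.append(overlaps(t, tf))
--         m.append([overlaps(tf, t) for t in seen] + [False])
--         seen.append(tf)
--     return m
-- ===== Notes on version B (the rewrite author's own statement) =====
-- stated objective: alternative
-- what changed: B builds the matrix online in one forward pass over the requests: for each new request it appends its overlap against every earlier request to each existing row and then adds one new bordering row ending in the diagonal False, using the positive overlap test start2<=end1 and start1<=end2, instead of A's full N x N double loop of rangeOverlaps calls followed by a separate diagonal-clearing pass.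
import Mathlib
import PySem

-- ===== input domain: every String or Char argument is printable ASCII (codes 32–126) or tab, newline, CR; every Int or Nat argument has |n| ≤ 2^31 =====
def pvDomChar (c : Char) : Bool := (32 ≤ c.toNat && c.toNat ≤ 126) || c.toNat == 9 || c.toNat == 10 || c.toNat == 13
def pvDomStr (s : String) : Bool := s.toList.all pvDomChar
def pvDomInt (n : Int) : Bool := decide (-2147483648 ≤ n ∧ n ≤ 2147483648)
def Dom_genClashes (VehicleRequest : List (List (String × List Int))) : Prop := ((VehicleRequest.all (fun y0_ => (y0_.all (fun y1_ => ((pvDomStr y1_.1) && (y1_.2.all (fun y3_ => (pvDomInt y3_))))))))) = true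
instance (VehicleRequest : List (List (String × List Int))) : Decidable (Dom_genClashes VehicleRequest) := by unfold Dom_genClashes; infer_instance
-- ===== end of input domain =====

-- B builds the matrix online in one forward pass (append to each existing row, add one bordering
-- row ending in the diagonal False); A fills the full N×N matrix then clears the diagonal.

-- ===== PORT A =====
-- request["timeframe"]: first-match association-list lookup (total form; Pre_ guarantees the key is present)
def pvTf (r : List (String × List Int)) : List Int := (List.lookup "timeframe" r).getD []

def rangeOverlapsA (range1 range2 : List Int) : Bool :=
  let start1 := PySem.List.pyGetD range1 0 0
  let start2 := PySem.List.pyGetD range2 0 0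
  let end1 := PySem.List.pyGetD range1 1 0
  let end2 := PySem.List.pyGetD range2 1 0
  if end1 < start2 ∨ end2 < start1 then false else true

def genClashes (VehicleRequest : List (List (String × List Int))) : List (List Bool) :=
  let clashing := VehicleRequest.foldl (fun acc r1 =>
    acc ++ [VehicleRequest.foldl (fun acc2 r2 =>
      acc2 ++ [rangeOverlapsA (pvTf r1) (pvTf r2)]) []]) []
  (PySem.List.pyRange 0 (VehicleRequest.length) 1).foldl
    (fun m i => PySem.List.pySetD m i (PySem.List.pySetD (PySem.List.pyGetD m i []) i false))
    clashing

-- ===== PORT B =====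
-- Source B's overlaps(t1, t2): t2[0] <= t1[1] and t1[0] <= t2[1]
def overlapsB (t1 t2 : List Int) : Bool :=
  decide (PySem.List.pyGetD t2 0 0 ≤ PySem.List.pyGetD t1 1 0 ∧
          PySem.List.pyGetD t1 0 0 ≤ PySem.List.pyGetD t2 1 0)

-- one iteration of Source B's single forward loop, state = (seen, m);
-- 'for t, row in zip(seen, m): row.append(overlaps(t, tf))' is the zip-map,
-- 'm.append([...] + [False])' and 'seen.append(tf)' are the two ++ [·]
def pvStepB (st : List (List Int) × List (List Bool)) (r : List (String × List Int)) :
    List (List Int) × List (List Bool) :=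
  let tf := pvTf r
  let m2 := (st.1.zip st.2).map (fun p => p.2 ++ [overlapsB p.1 tf])
  (st.1 ++ [tf], m2 ++ [st.1.map (fun t => overlapsB tf t) ++ [false]])

def genClashes_alt (VehicleRequest : List (List (String × List Int))) : List (List Bool) :=
  (VehicleRequest.foldl pvStepB ([], [])).2

-- ===== PRECONDITION & SPEC =====
-- Pre_ excludes exactly the inputs where A raises: a request without a "timeframe" key (KeyError)
-- or whose timeframe list has fewer than two elements (IndexError).
def Pre_genClashes (VehicleRequest : List (List (String × List Int))) : Prop :=
  ∀ r ∈ VehicleRequest, ∃ tf, List.lookup "timeframe" r = some tf ∧ 2 ≤ tf.length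
instance (VehicleRequest : List (List (String × List Int))) : Decidable (Pre_genClashes VehicleRequest) := by unfold Pre_genClashes; infer_instance

def pvWitness_genClashes : (List (List (String × List Int))) :=
  [[("timeframe", [0, 2])], [("timeframe", [3, 5])], [("timeframe", [1, 4])]]

def Spec_genClashes (VehicleRequest : List (List (String × List Int))) (out : List (List Bool)) : Prop := out = genClashes_alt VehicleRequest
instance (VehicleRequest : List (List (String × List Int))) (out : List (List Bool)) : Decidable (Spec_genClashes VehicleRequest out) := by unfold Spec_genClashes; infer_instance

-- ===== CLAIM (what is proved, stated in full; the proofs are below) =====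
def Claim_equal_genClashes : Prop := ∀ (VehicleRequest : List (List (String × List Int))), Dom_genClashes VehicleRequest → Pre_genClashes VehicleRequest → Spec_genClashes VehicleRequest (genClashes VehicleRequest)

-- ===== LEMMAS AND PROOFS =====

-- proof helpers
def pvCell (m : List (List Bool)) (a b : Nat) : Bool := (m.getD a []).getD b false
def pvShape (n : Nat) (m : List (List Bool)) : Prop := m.length = n ∧ ∀ row ∈ m, row.length = n
def pvS (VR : List (List (String × List Int))) (a : Nat) : Int := PySem.List.pyGetD (pvTf (VR.getD a [])) 0 0
def pvE (VR : List (List (String × List Int))) (a : Nat) : Int := PySem.List.pyGetD (pvTf (VR.getD a [])) 1 0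
def pvOv (VR : List (List (String × List Int))) (a b : Nat) : Bool :=
  rangeOverlapsA (pvTf (VR.getD a [])) (pvTf (VR.getD b []))

theorem pv_getD_set {α : Type} (l : List α) (i j : Nat) (a d : α) :
    (l.set i a).getD j d = if i = j ∧ i < l.length then a else l.getD j d := by
  simp only [List.getD_eq_getElem?_getD, List.getElem?_set]
  split_ifs with h1 h2 <;> simp_all
  omega

theorem pv_row_len {n : Nat} {m : List (List Bool)} (hm : pvShape n m) {i : Nat} (hi : i < n) :
    (m.getD i []).length = n := by
  obtain ⟨h1, h2⟩ := hm
  have hg : m.getD i [] = m[i]'(by omega) := by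
    rw [List.getD_eq_getElem?_getD, List.getElem?_eq_getElem (by omega)]; rfl
  rw [hg]; exact h2 _ (List.getElem_mem _)

def pvSet2 (m : List (List Bool)) (i j : Int) (v : Bool) : List (List Bool) :=
  PySem.List.pySetD m i (PySem.List.pySetD (PySem.List.pyGetD m i []) j v)

theorem pvSet2_eq (m : List (List Bool)) (i j : Nat) (v : Bool) :
    pvSet2 m (i : Int) (j : Int) v = m.set i ((m.getD i []).set j v) := by
  simp [pvSet2]

theorem shape_pvSet2 {n : Nat} {m : List (List Bool)} (hm : pvShape n m) (i j : Nat) (v : Bool) :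
    pvShape n (pvSet2 m (i : Int) (j : Int) v) := by
  by_cases hi : i < n
  · rw [pvSet2_eq]
    obtain ⟨h1, h2⟩ := hm
    refine ⟨by simpa using h1, ?_⟩
    intro row hrow
    rcases List.mem_or_eq_of_mem_set hrow with h | h
    · exact h2 _ h
    · subst h; rw [List.length_set]
      exact pv_row_len ⟨h1, h2⟩ hi
  · rw [pvSet2_eq, List.set_eq_of_length_le (by have := hm.1; omega)]
    exact hm

theorem cell_pvSet2 {n : Nat} {m : List (List Bool)} (hm : pvShape n m) {i j : Nat}
    (hi : i < n) (hj : j < n) (v : Bool) (a b : Nat) :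
    pvCell (pvSet2 m (i : Int) (j : Int) v) a b = if a = i ∧ b = j then v else pvCell m a b := by
  have hrl := pv_row_len hm hi
  have h1 := hm.1
  rw [pvSet2_eq]
  unfold pvCell
  rw [pv_getD_set]
  by_cases ha : i = a
  · subst ha
    rw [if_pos ⟨rfl, by omega⟩, pv_getD_set, hrl]
    split_ifs <;> first | rfl | omega
  · rw [if_neg (by tauto), if_neg (by tauto)]

-- matrix extensionality by cells
theorem pv_matEq {n : Nat} {m m' : List (List Bool)} (h1 : pvShape n m) (h2 : pvShape n m')
    (hc : ∀ a b, a < n → b < n → pvCell m a b = pvCell m' a b) : m = m' := by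
  obtain ⟨l1, r1⟩ := h1; obtain ⟨l2, r2⟩ := h2
  apply List.ext_getElem (by omega)
  intro a ha ha'
  have hra : m[a].length = n := r1 _ (List.getElem_mem _)
  have hra' : m'[a].length = n := r2 _ (List.getElem_mem _)
  apply List.ext_getElem (by omega)
  intro b hb hb'
  have hcab := hc a b (by omega) (by omega)
  have hrow1 : m.getD a [] = m[a] := by
    rw [List.getD_eq_getElem?_getD, List.getElem?_eq_getElem ha]; rfl
  have hrow2 : m'.getD a [] = m'[a] := by
    rw [List.getD_eq_getElem?_getD, List.getElem?_eq_getElem ha']; rfl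
  have e1 : pvCell m a b = m[a][b] := by
    unfold pvCell
    rw [hrow1, List.getD_eq_getElem?_getD, List.getElem?_eq_getElem hb]; rfl
  have e2 : pvCell m' a b = m'[a][b] := by
    unfold pvCell
    rw [hrow2, List.getD_eq_getElem?_getD, List.getElem?_eq_getElem hb']; rfl
  rw [← e1, ← e2, hcab]

theorem pv_getD_lt {α : Type} (l : List α) (i : Nat) (h : i < l.length) (d : α) :
    l.getD i d = l[i] := by
  rw [List.getD_eq_getElem?_getD, List.getElem?_eq_getElem h]; rfl

theorem pv_getD_map {α β : Type} (f : α → β) (l : List α) (i : Nat) (h : i < l.length) (d : β) :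
    (l.map f).getD i d = f (l[i]) := by
  rw [List.getD_eq_getElem?_getD, List.getElem?_map, List.getElem?_eq_getElem h]; rfl

-- ===== A-side characterization =====
theorem pv_clashing_eq (VR : List (List (String × List Int))) :
    VR.foldl (fun acc r1 => acc ++ [VR.foldl (fun acc2 r2 =>
      acc2 ++ [rangeOverlapsA (pvTf r1) (pvTf r2)]) []]) []
    = VR.map (fun r1 => VR.map (fun r2 => rangeOverlapsA (pvTf r1) (pvTf r2))) := by
  have hinner : ∀ r1, VR.foldl (fun acc2 r2 => acc2 ++ [rangeOverlapsA (pvTf r1) (pvTf r2)]) []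
      = VR.map (fun r2 => rangeOverlapsA (pvTf r1) (pvTf r2)) := fun r1 => by
    simpa using PySem.List.foldl_append_singleton_eq_map
      (fun r2 => rangeOverlapsA (pvTf r1) (pvTf r2)) VR []
  simp only [hinner]
  simpa using PySem.List.foldl_append_singleton_eq_map
    (fun r1 => VR.map (fun r2 => rangeOverlapsA (pvTf r1) (pvTf r2))) VR []

theorem pv_shape_mapmap (VR : List (List (String × List Int))) :
    pvShape VR.length (VR.map (fun r1 => VR.map (fun r2 => rangeOverlapsA (pvTf r1) (pvTf r2)))) := by
  refine ⟨by simp, ?_⟩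
  intro row hrow
  simp only [List.mem_map] at hrow
  obtain ⟨r, _, rfl⟩ := hrow
  simp

theorem pv_cell_mapmap (VR : List (List (String × List Int))) (a b : Nat)
    (ha : a < VR.length) (hb : b < VR.length) :
    pvCell (VR.map (fun r1 => VR.map (fun r2 => rangeOverlapsA (pvTf r1) (pvTf r2)))) a b
    = pvOv VR a b := by
  unfold pvCell pvOv
  rw [pv_getD_map _ _ _ ha, pv_getD_map _ _ _ hb, pv_getD_lt _ _ ha, pv_getD_lt _ _ hb]

theorem pv_diagAux (n : Nat) : ∀ (c k : Nat) (m : List (List Bool)), n = k + c → pvShape n m →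
    pvShape n ((PySem.List.pyRange (k : Int) (n : Int)).foldl
      (fun m i => PySem.List.pySetD m i (PySem.List.pySetD (PySem.List.pyGetD m i []) i false)) m) ∧
    ∀ a b, a < n → b < n →
      pvCell ((PySem.List.pyRange (k : Int) (n : Int)).foldl
        (fun m i => PySem.List.pySetD m i (PySem.List.pySetD (PySem.List.pyGetD m i []) i false)) m) a b
      = if a = b ∧ k ≤ a then false else pvCell m a b := by
  intro c
  induction c with
  | zero =>
    intro k m hn hm
    rw [PySem.List.pyRange_one_eq_nil (by omega)]
    exact ⟨hm, fun a b ha hb => by rw [List.foldl_nil, if_neg (by omega)]⟩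
  | succ c ih =>
    intro k m hn hm
    have hk : k < n := by omega
    rw [PySem.List.pyRange_one_cons (by exact_mod_cast hk), List.foldl_cons]
    have hstep : PySem.List.pySetD m (k : Int) (PySem.List.pySetD (PySem.List.pyGetD m (k : Int) []) (k : Int) false)
        = pvSet2 m (k : Int) (k : Int) false := rfl
    have hcast : ((k : Int) + 1) = ((k + 1 : Nat) : Int) := by push_cast; ring
    rw [hstep, hcast]
    have hm' := shape_pvSet2 hm k k false
    obtain ⟨hsh, hcell⟩ := ih (k + 1) _ (by omega) hm'
    refine ⟨hsh, fun a b ha hb => ?_⟩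
    rw [hcell a b ha hb, cell_pvSet2 hm hk hk false a b]
    split_ifs <;> first | rfl | omega

-- ===== B-side characterization =====
-- the intended matrix over a list of timeframes
def pvMat (ts : List (List Int)) : List (List Bool) :=
  (List.range ts.length).map (fun a => (List.range ts.length).map
    (fun b => if a = b then false else overlapsB (ts.getD a []) (ts.getD b [])))

theorem pv_map_range_getD {α β : Type} (l : List α) (f : α → β) (d : α) :
    (List.range l.length).map (fun b => f (l.getD b d)) = l.map f := by
  apply List.ext_getElem (by simp)
  intro i h1 h2
  simp only [List.getElem_map, List.getElem_range]
  rw [pv_getD_lt _ _ (by simpa using h1)]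

theorem pv_getD_append_lt {α : Type} (l l' : List α) (a : Nat) (h : a < l.length) (d : α) :
    (l ++ l').getD a d = l.getD a d := by
  rw [List.getD_eq_getElem?_getD, List.getElem?_append_left h, ← List.getD_eq_getElem?_getD]

theorem pv_getD_append_len {α : Type} (l : List α) (x : α) (d : α) :
    (l ++ [x]).getD l.length d = x := by
  rw [List.getD_eq_getElem?_getD, List.getElem?_append_right (le_refl _)]
  simp

theorem pv_stepB_mat (ts : List (List Int)) (r : List (String × List Int)) :
    pvStepB (ts, pvMat ts) r = (ts ++ [pvTf r], pvMat (ts ++ [pvTf r])) := by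
  set tf := pvTf r with htf
  unfold pvStepB
  simp only
  refine Prod.ext rfl ?_
  show (ts.zip (pvMat ts)).map (fun p => p.2 ++ [overlapsB p.1 tf])
      ++ [ts.map (fun t => overlapsB tf t) ++ [false]] = pvMat (ts ++ [tf])
  have hRHS : pvMat (ts ++ [tf])
      = (List.range ts.length).map (fun a => (List.range (ts.length + 1)).map
          (fun b => if a = b then false else overlapsB ((ts ++ [tf]).getD a []) ((ts ++ [tf]).getD b [])))
        ++ [(List.range (ts.length + 1)).map
          (fun b => if ts.length = b then false else overlapsB ((ts ++ [tf]).getD ts.length []) ((ts ++ [tf]).getD b []))] := by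
    unfold pvMat
    rw [show (ts ++ [tf]).length = ts.length + 1 from by simp]
    rw [List.range_succ, List.map_append, List.map_singleton]
  have hrow : ∀ a : Nat, a < ts.length →
      (List.range (ts.length + 1)).map
        (fun b => if a = b then false else overlapsB ((ts ++ [tf]).getD a []) ((ts ++ [tf]).getD b []))
      = (List.range ts.length).map
          (fun b => if a = b then false else overlapsB (ts.getD a []) (ts.getD b []))
        ++ [overlapsB (ts.getD a []) tf] := by
    intro a ha
    rw [List.range_succ, List.map_append]
    congr 1
    · apply List.map_congr_left
      intro b hb
      have hb' : b < ts.length := by simpa using hb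
      rw [pv_getD_append_lt _ _ _ ha, pv_getD_append_lt _ _ _ hb']
    · simp only [List.map_cons, List.map_nil]
      rw [if_neg (by omega), pv_getD_append_lt _ _ _ ha, pv_getD_append_len]
  have hzip : (ts.zip (pvMat ts)).map (fun p => p.2 ++ [overlapsB p.1 tf])
      = (List.range ts.length).map (fun a =>
          (List.range ts.length).map
            (fun b => if a = b then false else overlapsB (ts.getD a []) (ts.getD b []))
          ++ [overlapsB (ts.getD a []) tf]) := by
    apply List.ext_getElem (by simp [pvMat])
    intro i h1 h2
    have hi : i < ts.length := by simp [pvMat] at h1; omega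
    simp only [List.getElem_map, List.getElem_zip, List.getElem_range]
    congr 1
    · unfold pvMat
      simp only [List.getElem_map, List.getElem_range]
    · rw [pv_getD_lt _ _ hi]
  rw [hRHS]
  congr 1
  · rw [hzip]
    apply List.map_congr_left
    intro a ha
    exact (hrow a (by simpa using ha)).symm
  · congr 1
    rw [List.range_succ, List.map_append, List.map_singleton]
    congr 1
    · rw [← pv_map_range_getD ts (fun t => overlapsB tf t) []]
      apply List.map_congr_left
      intro b hb
      have hb' : b < ts.length := by simpa using hb
      rw [if_neg (by omega), pv_getD_append_len, pv_getD_append_lt _ _ _ hb']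
    · rw [if_pos rfl]

theorem pv_foldB (l : List (List (String × List Int))) :
    ∀ ts : List (List Int), l.foldl pvStepB (ts, pvMat ts)
      = (ts ++ l.map pvTf, pvMat (ts ++ l.map pvTf)) := by
  induction l with
  | nil => intro ts; simp
  | cons r l ih =>
    intro ts
    rw [List.foldl_cons, pv_stepB_mat, ih (ts ++ [pvTf r])]
    simp

theorem pv_alt_eq_mat (VR : List (List (String × List Int))) :
    genClashes_alt VR = pvMat (VR.map pvTf) := by
  unfold genClashes_alt
  have h0 : (([], []) : List (List Int) × List (List Bool)) = ([], pvMat []) := by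
    simp [pvMat]
  rw [h0, pv_foldB VR []]
  simp

theorem pv_shape_mat (VR : List (List (String × List Int))) :
    pvShape VR.length (pvMat (VR.map pvTf)) := by
  unfold pvMat
  refine ⟨by simp, ?_⟩
  intro row hrow
  simp only [List.mem_map] at hrow
  obtain ⟨a, _, rfl⟩ := hrow
  simp

theorem pv_cell_mat (VR : List (List (String × List Int))) (a b : Nat)
    (ha : a < VR.length) (hb : b < VR.length) :
    pvCell (pvMat (VR.map pvTf)) a b
    = if a = b then false
      else overlapsB (pvTf (VR.getD a [])) (pvTf (VR.getD b [])) := by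
  unfold pvCell pvMat
  rw [pv_getD_map _ _ _ (by simpa using ha), List.getElem_range,
      pv_getD_map _ _ _ (by simpa using hb), List.getElem_range]
  rw [pv_getD_map pvTf VR a ha [], pv_getD_map pvTf VR b hb [],
      pv_getD_lt VR a ha, pv_getD_lt VR b hb]

theorem pv_ov_eq (t1 t2 : List Int) : rangeOverlapsA t1 t2 = overlapsB t1 t2 := by
  simp only [rangeOverlapsA, overlapsB]
  split_ifs with h
  · have hn : ¬ (PySem.List.pyGetD t2 0 0 ≤ PySem.List.pyGetD t1 1 0 ∧
        PySem.List.pyGetD t1 0 0 ≤ PySem.List.pyGetD t2 1 0) := by omega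
    simp [hn]
  · have hp : PySem.List.pyGetD t2 0 0 ≤ PySem.List.pyGetD t1 1 0 ∧
        PySem.List.pyGetD t1 0 0 ≤ PySem.List.pyGetD t2 1 0 := by omega
    simp [hp]

-- ===== VERDICT (by name: the statement is the Claim_ definition above) =====
theorem genClashes_spec : Claim_equal_genClashes := by
  unfold Claim_equal_genClashes
  intro VR _ _
  show genClashes VR = genClashes_alt VR
  have hAdef : genClashes VR = (PySem.List.pyRange (((0 : Nat)) : Int) (VR.length : Int)).foldl
      (fun m i => PySem.List.pySetD m i (PySem.List.pySetD (PySem.List.pyGetD m i []) i false))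
      (VR.map (fun r1 => VR.map (fun r2 => rangeOverlapsA (pvTf r1) (pvTf r2)))) := by
    rw [← pv_clashing_eq]; rfl
  obtain ⟨hshA, hcellA⟩ := pv_diagAux VR.length VR.length 0
    (VR.map (fun r1 => VR.map (fun r2 => rangeOverlapsA (pvTf r1) (pvTf r2))))
    (by omega) (pv_shape_mapmap VR)
  rw [hAdef, pv_alt_eq_mat]
  refine pv_matEq hshA (pv_shape_mat VR) (fun a b ha hb => ?_)
  rw [hcellA a b ha hb, pv_cell_mapmap VR a b ha hb, pv_cell_mat VR a b ha hb]
  unfold pvOv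
  rw [pv_ov_eq]
  by_cases hab : a = b <;> simp [hab]
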